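-- pv_equiv track=rewrite | github.com/Steflavoie65/Lychrel_196_Formula | scripts/validate_aext2.py | compute_A_int
-- ===== SOURCE A (Python) =====
-- def compute_A_int(digits):
--     """Compute internal asymmetry A^(int) with exponential weights"""
--     d = len(digits)
--     if d <= 2:
--         return 0
--
--     total = 0
--     for i in range(1, d // 2):
--         weight = 2 ** (i - 1)
--         diff = abs(digits[i] - digits[d - 1 - i])
--         total += weight * diff
--     return total
-- ===== SOURCE B (Python) =====
-- def compute_A_int(digits):
--     """Compute internal asymmetry A^(int) by balanced divide-and-conquer.
--
--     solve(lo, hi) returns (sum_{i in [lo,hi)} 2**(i-lo) * |digits[i]-digits[d-1-i]|, 2**(hi-lo)),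
--     combining halves as left + 2**(mid-lo) * right, so no per-element power is computed."""
--     d = len(digits)
--     if d // 2 <= 1:
--         return 0
--
--     def solve(lo, hi):
--         if hi - lo == 1:
--             return (abs(digits[lo] - digits[d - 1 - lo]), 2)
--         mid = (lo + hi) // 2
--         sl, pl = solve(lo, mid)
--         sr, pr = solve(mid, hi)
--         return (sl + pl * sr, pl * pr)
--
--     return solve(1, d // 2)[0]
-- ===== Notes on version B (the rewrite author's own statement) =====
-- stated objective: faster
-- what changed: B replaces A's linear index loop, which materialises the power 2**(i-1) for every index, by a recursive balanced divide-and-conquer over the index range [1, d//2): each call returns (weighted sum of its half, 2^(range length)) and halves combine as left_sum + left_power * right_sum, so no per-index power is ever computed.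
import Mathlib
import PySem

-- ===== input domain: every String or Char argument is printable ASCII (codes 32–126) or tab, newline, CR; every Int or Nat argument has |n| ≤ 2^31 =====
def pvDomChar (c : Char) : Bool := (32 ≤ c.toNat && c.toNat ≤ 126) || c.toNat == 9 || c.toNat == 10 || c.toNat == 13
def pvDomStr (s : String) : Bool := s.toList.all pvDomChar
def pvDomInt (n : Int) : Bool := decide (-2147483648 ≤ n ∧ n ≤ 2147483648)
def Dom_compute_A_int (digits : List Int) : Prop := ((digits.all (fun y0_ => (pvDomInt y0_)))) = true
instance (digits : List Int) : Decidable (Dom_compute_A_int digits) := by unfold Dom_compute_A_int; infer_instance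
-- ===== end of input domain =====

-- B replaces A's linear loop with per-index powers 2**(i-1) by a balanced divide-and-conquer that combines half-range sums as left + 2^(mid-lo) * right (alternative decomposition).


-- ===== PORT A =====
def compute_A_int (digits : List Int) : Int :=
  let d : Int := digits.length
  if d ≤ 2 then 0
  else
    (PySem.List.pyRange 1 (PySem.Int.floordiv d 2) 1).foldl
      (fun total i =>
        let weight : Int := 2 ^ (i - 1).toNat
        let diff : Int := |PySem.List.pyGetD digits i 0 - PySem.List.pyGetD digits (d - 1 - i) 0|
        total + weight * diff) 0

-- ===== PORT B =====
-- solve(lo, hi) of Source B; the 'hi - lo ≤ 0' branch is a totality guard only (Python never calls it there).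
def pvSolve (digits : List Int) (d lo hi : Int) : Int × Int :=
  if hi - lo = 1 then
    (|PySem.List.pyGetD digits lo 0 - PySem.List.pyGetD digits (d - 1 - lo) 0|, 2)
  else if hi - lo ≤ 0 then (0, 1)
  else
    let mid := PySem.Int.floordiv (lo + hi) 2
    let l := pvSolve digits d lo mid
    let r := pvSolve digits d mid hi
    (l.1 + l.2 * r.1, l.2 * r.2)
termination_by (hi - lo).toNat
decreasing_by
  · have h := PySem.Int.floordiv_mul_add_mod (lo + hi) 2
    have h1 := PySem.Int.mod_nonneg (lo + hi) (b := 2) (by norm_num)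
    have h2 := PySem.Int.mod_lt (lo + hi) (b := 2) (by norm_num)
    omega
  · have h := PySem.Int.floordiv_mul_add_mod (lo + hi) 2
    have h1 := PySem.Int.mod_nonneg (lo + hi) (b := 2) (by norm_num)
    have h2 := PySem.Int.mod_lt (lo + hi) (b := 2) (by norm_num)
    omega

def compute_A_int_alt (digits : List Int) : Int :=
  let d : Int := digits.length
  if PySem.Int.floordiv d 2 ≤ 1 then 0
  else (pvSolve digits d 1 (PySem.Int.floordiv d 2)).1

-- ===== PRECONDITION & SPEC =====
def Spec_compute_A_int (digits : List Int) (out : Int) : Prop := out = compute_A_int_alt digits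
instance (digits : List Int) (out : Int) : Decidable (Spec_compute_A_int digits out) := by unfold Spec_compute_A_int; infer_instance

-- ===== CLAIM (what is proved, stated in full; the proofs are below) =====
def Claim_equal_compute_A_int : Prop := ∀ (digits : List Int), Dom_compute_A_int digits → Spec_compute_A_int digits (compute_A_int digits)

-- ===== LEMMAS AND PROOFS =====

/-- The pair diff at index i, shared by both ports. -/
def pvDiff (digits : List Int) (d i : Int) : Int :=
  |PySem.List.pyGetD digits i 0 - PySem.List.pyGetD digits (d - 1 - i) 0|

/-- Closed form of pvSolve on a nonempty range: the weighted sum and the total power. -/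
theorem pvSolve_spec (digits : List Int) (d : Int) : ∀ (n : Nat) (lo hi : Int),
    (hi - lo).toNat = n → 1 ≤ n →
    pvSolve digits d lo hi
      = (((List.range n).map (fun (j : Nat) => (2 : Int) ^ j * pvDiff digits d (lo + (j : Int)))).sum, 2 ^ n) := by
  intro n
  induction n using Nat.strong_induction_on with
  | _ n ih =>
    intro lo hi hn h1
    by_cases hbase : hi - lo = 1
    · have : n = 1 := by omega
      subst this
      rw [pvSolve]
      simp [hbase, pvDiff]
    · have h2 : 2 ≤ hi - lo := by omega
      rw [pvSolve]
      rw [if_neg hbase, if_neg (by omega : ¬hi - lo ≤ 0)]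
      dsimp only
      have hq := PySem.Int.floordiv_mul_add_mod (lo + hi) 2
      have hr1 := PySem.Int.mod_nonneg (lo + hi) (b := 2) (by norm_num)
      have hr2 := PySem.Int.mod_lt (lo + hi) (b := 2) (by norm_num)
      set mid := PySem.Int.floordiv (lo + hi) 2 with hmid
      have hlm : 1 ≤ mid - lo := by omega
      have hmh : 1 ≤ hi - mid := by omega
      set a := (mid - lo).toNat with ha
      set b := (hi - mid).toNat with hb
      have hab : a + b = n := by omega
      have ha1 : 1 ≤ a := by omega
      have hb1 : 1 ≤ b := by omega
      rw [ih a (by omega) lo mid rfl ha1, ih b (by omega) mid hi rfl hb1]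
      dsimp only
      rw [Prod.mk.injEq]
      constructor
      · -- sums combine
        have hrange : List.range n = List.range a ++ (List.range b).map (a + ·) := by
          rw [← hab]; exact List.range_add
        rw [hrange, List.map_append, List.map_map, List.sum_append]
        congr 1
        rw [← List.sum_map_mul_left]
        apply congrArg List.sum
        apply List.map_congr_left
        intro j hj
        simp only [Function.comp]
        have hmidlo : mid = lo + (a : Int) := by omega
        rw [hmidlo]
        push_cast
        rw [pow_add, ← add_assoc]
        ring
      · rw [← pow_add, hab]

-- ===== VERDICT (by name: the statement is the Claim_ definition above) =====
theorem compute_A_int_spec : Claim_equal_compute_A_int := by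
  intro digits _
  unfold Spec_compute_A_int compute_A_int compute_A_int_alt
  dsimp only
  set d : Int := (digits.length : Int) with hd
  set m : Int := PySem.Int.floordiv d 2 with hmdef
  have hm : m = d / 2 := PySem.Int.floordiv_eq_ediv_of_pos (by norm_num)
  have hd0 : 0 ≤ d := by positivity
  by_cases h2 : d ≤ 2
  · rw [if_pos h2, if_pos (show m ≤ 1 by omega)]
  · rw [if_neg h2]
    by_cases hm1 : m ≤ 1
    · rw [if_pos hm1, PySem.List.pyRange_one_eq_nil hm1]
      simp
    · rw [if_neg hm1]
      rw [PySem.List.foldl_add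
        (g := fun i => 2 ^ (i - 1).toNat *
          |PySem.List.pyGetD digits i 0 - PySem.List.pyGetD digits (d - 1 - i) 0|)]
      set n : Nat := (m - 1).toNat with hn
      rw [pvSolve_spec digits d n 1 m (by omega) (by omega)]
      rw [PySem.List.pyRange_one, List.map_map]
      rw [zero_add]
      congr 1
      apply List.map_congr_left
      intro j hj
      simp only [Function.comp, pvDiff]
      have : ((1 : Int) + j - 1).toNat = j := by omega
      rw [this]
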